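-- pv_equiv track=rewrite | github.com/danieleschmidt/protein-sssl-operator | protein_sssl/analysis/domain_analysis.py | _predict_binding_sites
-- ===== SOURCE A (Python) =====
-- from typing import Dict, List, Optional, Tuple, Union, NamedTuple
--
-- def _predict_binding_sites(sequence: str, offset: int) -> List[int]:
--     """Predict potential binding sites in the domain"""
--
--     binding_sites = []
--
--     # Look for potential catalytic residues
--     catalytic_residues = ['D', 'E', 'H', 'C', 'S', 'T', 'Y']
--
--     for i, aa in enumerate(sequence):
--         if aa in catalytic_residues:
--             # Check local environment for binding potential
--             if i >= 2 and i < len(sequence) - 2: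
--                 local_env = sequence[i-2:i+3]
--                 # Simple heuristic: hydrophobic environment around catalytic residue
--                 hydrophobic_count = sum(1 for a in local_env if a in 'AILMFWV')
--                 if hydrophobic_count >= 2:
--                     binding_sites.append(offset + i)
--
--     return binding_sites[:5]  # Limit to top 5 predictions
-- ===== SOURCE B (Python) =====
-- def _predict_binding_sites(sequence: str, offset: int):
--     """Predict potential binding sites (prefix-sum reimplementation)."""
--     n = len(sequence)
--     # H[k] = number of hydrophobic residues in sequence[:k]
--     H = [0] * (n + 1)
--     for k in range(n):
--         H[k + 1] = H[k] + (sequence[k] in 'AILMFWV')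
--     sites = []
--     for i in range(2, n - 2):
--         if sequence[i] in 'DEHCSTY' and H[i + 3] - H[i - 2] >= 2:
--             sites.append(offset + i)
--     return sites[:5]
-- ===== Notes on version B (the rewrite author's own statement) =====
-- stated objective: alternative
-- what changed: B precomputes a prefix-sum table of hydrophobic counts in one pass and decides each catalytic residue by the table lookup H[i+3]-H[i-2] over range(2, n-2), instead of A's enumerate loop that re-scans the 5-character window around every catalytic residue.
import Mathlib
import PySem

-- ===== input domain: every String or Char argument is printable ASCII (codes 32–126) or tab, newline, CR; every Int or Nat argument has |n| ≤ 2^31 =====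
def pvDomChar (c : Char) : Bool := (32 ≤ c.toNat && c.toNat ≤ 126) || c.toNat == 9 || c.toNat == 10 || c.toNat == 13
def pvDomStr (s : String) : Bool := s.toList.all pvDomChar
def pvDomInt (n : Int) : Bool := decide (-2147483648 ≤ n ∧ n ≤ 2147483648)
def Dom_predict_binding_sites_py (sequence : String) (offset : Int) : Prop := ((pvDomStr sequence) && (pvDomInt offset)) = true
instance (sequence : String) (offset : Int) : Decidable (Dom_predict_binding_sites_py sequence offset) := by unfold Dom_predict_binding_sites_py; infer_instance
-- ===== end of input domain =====

-- B replaces A's per-residue rescan of the 5-char window by a prefix-sum table of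
-- hydrophobic counts, looked up as H[i+3]-H[i-2]; objective: alternative (no measured speed claim).


-- ===== PORT A =====
-- for i, aa in enumerate(sequence): if aa in catalytic_residues: if 2 <= i < len-2:
--   count hydrophobics in sequence[i-2:i+3] by rescanning the window; append if >= 2; return first 5
def predict_binding_sites_py (sequence : String) (offset : Int) : List Int :=
  let cs := sequence.toList
  let binding_sites :=
    (PySem.List.enumerate cs).foldl (fun acc p =>
      if p.2 ∈ ['D', 'E', 'H', 'C', 'S', 'T', 'Y'] then
        if 2 ≤ p.1 ∧ p.1 < (cs.length : Int) - 2 then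
          let local_env := PySem.List.slice cs (some (p.1 - 2)) (some (p.1 + 3))
          let hydrophobic_count :=
            local_env.foldl (fun c a => if a ∈ "AILMFWV".toList then c + 1 else c) (0 : Int)
          if 2 ≤ hydrophobic_count then acc ++ [offset + p.1] else acc
        else acc
      else acc) []
  binding_sites.take 5

-- ===== PORT B =====
-- H[k+1] = H[k] + (sequence[k] in 'AILMFWV'), built in one pass (running accumulator)
def pvPrefixH (cs : List Char) (acc : Int) : List Int :=
  match cs with
  | [] => [acc]
  | a :: rest => acc :: pvPrefixH rest (acc + (if a ∈ "AILMFWV".toList then 1 else 0))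

-- for i in range(2, n-2): if sequence[i] in 'DEHCSTY' and H[i+3]-H[i-2] >= 2: append; return sites[:5]
def predict_binding_sites_py_alt (sequence : String) (offset : Int) : List Int :=
  let cs := sequence.toList
  let H := pvPrefixH cs 0
  let sites :=
    (PySem.List.pyRange 2 ((cs.length : Int) - 2) 1).foldl (fun acc i =>
      if PySem.List.pyGetD cs i ' ' ∈ "DEHCSTY".toList ∧
         2 ≤ PySem.List.pyGetD H (i + 3) 0 - PySem.List.pyGetD H (i - 2) 0 then
        acc ++ [offset + i]
      else acc) []
  sites.take 5

-- ===== PRECONDITION & SPEC =====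
def Spec_predict_binding_sites_py (sequence : String) (offset : Int) (out : List Int) : Prop := out = predict_binding_sites_py_alt sequence offset
instance (sequence : String) (offset : Int) (out : List Int) : Decidable (Spec_predict_binding_sites_py sequence offset out) := by unfold Spec_predict_binding_sites_py; infer_instance

-- ===== CLAIM (what is proved, stated in full; the proofs are below) =====
def Claim_equal_predict_binding_sites_py : Prop := ∀ (sequence : String) (offset : Int), Dom_predict_binding_sites_py sequence offset → Spec_predict_binding_sites_py sequence offset (predict_binding_sites_py sequence offset)

-- ===== LEMMAS AND PROOFS =====

def pvHyd (a : Char) : Bool := decide (a ∈ "AILMFWV".toList)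

def pvQA (cs : List Char) (p : Int × Char) : Bool :=
  decide (p.2 ∈ ['D', 'E', 'H', 'C', 'S', 'T', 'Y']) &&
  decide (2 ≤ p.1 ∧ p.1 < (cs.length : Int) - 2) &&
  decide (2 ≤ (PySem.List.slice cs (some (p.1 - 2)) (some (p.1 + 3))).foldl
               (fun c a => if a ∈ "AILMFWV".toList then c + 1 else c) (0 : Int))

def pvQB (cs : List Char) (i : Int) : Bool :=
  decide (PySem.List.pyGetD cs i ' ' ∈ "DEHCSTY".toList ∧
          2 ≤ PySem.List.pyGetD (pvPrefixH cs 0) (i + 3) 0 -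
              PySem.List.pyGetD (pvPrefixH cs 0) (i - 2) 0)

lemma pvHcnt_eq (xs : List Char) :
    xs.foldl (fun c a => if a ∈ "AILMFWV".toList then c + 1 else c) (0 : Int)
      = (xs.countP pvHyd : Int) := by
  have h := PySem.List.foldl_count_if pvHyd xs 0
  simpa [pvHyd] using h

lemma pvPrefixH_getD (cs : List Char) (c : Int) (m : Nat) (hm : m ≤ cs.length) :
    (pvPrefixH cs c).getD m 0 = c + ((cs.take m).countP pvHyd : Int) := by
  induction cs generalizing c m with
  | nil =>
    have h0 : m = 0 := by simpa using hm
    subst h0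
    simp [pvPrefixH]
  | cons a rest ih =>
    cases m with
    | zero => simp [pvPrefixH]
    | succ m =>
      have hm' : m ≤ rest.length := by simpa using hm
      simp only [pvPrefixH, List.getD_cons_succ, List.take_succ_cons, List.countP_cons]
      rw [ih _ _ hm']
      by_cases h : a ∈ "AILMFWV".toList
      · simp [pvHyd]; ring
      · simp [pvHyd]; ring

lemma pvWindow (cs : List Char) (k : Nat) (h2 : 2 ≤ k) (hk : k + 2 < cs.length) :
    PySem.List.pyGetD (pvPrefixH cs 0) ((k : Int) + 3) 0 -
      PySem.List.pyGetD (pvPrefixH cs 0) ((k : Int) - 2) 0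
      = ((List.take 5 (List.drop (k - 2) cs)).countP pvHyd : Int) := by
  have e1 : ((k : Int) + 3) = ((k + 3 : Nat) : Int) := by push_cast; ring
  have e2 : ((k : Int) - 2) = ((k - 2 : Nat) : Int) := by omega
  rw [e1, e2, PySem.List.pyGetD_natCast, PySem.List.pyGetD_natCast]
  rw [pvPrefixH_getD cs 0 (k + 3) (by omega), pvPrefixH_getD cs 0 (k - 2) (by omega)]
  have e3 : k + 3 = (k - 2) + 5 := by omega
  rw [e3, List.take_add, List.countP_append]
  push_cast; ring

lemma pvSlice_window (cs : List Char) (k : Nat) (h2 : 2 ≤ k) :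
    PySem.List.slice cs (some ((k : Int) - 2)) (some ((k : Int) + 3))
      = List.take 5 (List.drop (k - 2) cs) := by
  have e1 : ((k : Int) - 2) = ((k - 2 : Nat) : Int) := by omega
  have e2 : ((k : Int) + 3) = ((k + 3 : Nat) : Int) := by push_cast; ring
  rw [e1, e2, PySem.List.slice_natCast]
  congr 1
  omega

lemma pvQ_agree (cs : List Char) (j : Int) (h2 : 2 ≤ j) (hj : j < (cs.length : Int) - 2) :
    pvQA cs (j, PySem.List.pyGetD cs j ' ') = pvQB cs j := by
  have hk0 : 0 ≤ j := by omega
  obtain ⟨k, rfl⟩ : ∃ k : Nat, j = (k : Int) := ⟨j.toNat, by omega⟩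
  have hk2 : 2 ≤ k := by exact_mod_cast h2
  have hkl : k + 2 < cs.length := by omega
  have hs : "DEHCSTY".toList = ['D', 'E', 'H', 'C', 'S', 'T', 'Y'] := rfl
  simp only [pvQA, pvQB, pvHcnt_eq, pvSlice_window cs k hk2, pvWindow cs k hk2 hkl, hs]
  have hrange : (2 ≤ (k : Int) ∧ (k : Int) < (cs.length : Int) - 2) := ⟨h2, hj⟩
  simp [hrange, Bool.decide_and]

lemma pvFilter_eq (cs : List Char) :
    (PySem.List.pyRange 0 (cs.length : Int) 1).filter
        (fun j => pvQA cs (j, PySem.List.pyGetD cs j ' '))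
      = (PySem.List.pyRange 2 ((cs.length : Int) - 2) 1).filter (pvQB cs) := by
  by_cases h4 : 4 ≤ cs.length
  · have h1 : (0 : Int) ≤ 2 := by omega
    have h2 : (2 : Int) ≤ (cs.length : Int) - 2 := by omega
    have h3 : (cs.length : Int) - 2 ≤ (cs.length : Int) := by omega
    rw [PySem.List.pyRange_one_append 0 2 (cs.length : Int) h1 (by omega),
        PySem.List.pyRange_one_append 2 ((cs.length : Int) - 2) (cs.length : Int) h2 h3,
        List.filter_append, List.filter_append]
    have hl : (PySem.List.pyRange 0 2 1).filter
        (fun j => pvQA cs (j, PySem.List.pyGetD cs j ' ')) = [] := by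
      rw [List.filter_eq_nil_iff]
      intro j hj
      have := PySem.List.mem_pyRange_one.mp hj
      simp [pvQA]
      intro _ hge
      omega
    have hr : (PySem.List.pyRange ((cs.length : Int) - 2) (cs.length : Int) 1).filter
        (fun j => pvQA cs (j, PySem.List.pyGetD cs j ' ')) = [] := by
      rw [List.filter_eq_nil_iff]
      intro j hj
      have := PySem.List.mem_pyRange_one.mp hj
      simp [pvQA]
      intro _ hge
      omega
    rw [hl, hr, List.nil_append, List.append_nil]
    apply List.filter_congr
    intro j hj
    have hb := PySem.List.mem_pyRange_one.mp hj
    exact pvQ_agree cs j hb.1 hb.2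
  · have hL : (PySem.List.pyRange 0 (cs.length : Int) 1).filter
        (fun j => pvQA cs (j, PySem.List.pyGetD cs j ' ')) = [] := by
      rw [List.filter_eq_nil_iff]
      intro j hj
      have := PySem.List.mem_pyRange_one.mp hj
      simp [pvQA]
      intro _ hge
      omega
    have hR : PySem.List.pyRange 2 ((cs.length : Int) - 2) 1 = [] := by
      rw [List.eq_nil_iff_forall_not_mem]
      intro j hj
      have := PySem.List.mem_pyRange_one.mp hj
      omega
    rw [hL, hR, List.filter_nil]

-- ===== VERDICT (by name: the statement is the Claim_ definition above) =====
theorem predict_binding_sites_py_spec : Claim_equal_predict_binding_sites_py := by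
  intro sequence offset _
  unfold Spec_predict_binding_sites_py predict_binding_sites_py predict_binding_sites_py_alt
  set cs := sequence.toList with hcs
  have hstepA : (fun (acc : List Int) (p : Int × Char) =>
      if p.2 ∈ ['D', 'E', 'H', 'C', 'S', 'T', 'Y'] then
        if 2 ≤ p.1 ∧ p.1 < (cs.length : Int) - 2 then
          let local_env := PySem.List.slice cs (some (p.1 - 2)) (some (p.1 + 3))
          let hydrophobic_count :=
            local_env.foldl (fun c a => if a ∈ "AILMFWV".toList then c + 1 else c) (0 : Int)
          if 2 ≤ hydrophobic_count then acc ++ [offset + p.1] else acc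
        else acc
      else acc)
      = fun acc p => if pvQA cs p = true then acc ++ [offset + p.1] else acc := by
    funext acc p
    by_cases h1 : p.2 ∈ ['D', 'E', 'H', 'C', 'S', 'T', 'Y'] <;>
      by_cases h2 : 2 ≤ p.1 ∧ p.1 < (cs.length : Int) - 2 <;>
        by_cases h3 : 2 ≤ (PySem.List.slice cs (some (p.1 - 2)) (some (p.1 + 3))).foldl
            (fun c a => if a ∈ "AILMFWV".toList then c + 1 else c) (0 : Int) <;>
          simp [pvQA, h1, h2, h3]

  have hstepB : (fun (acc : List Int) (i : Int) =>
      if PySem.List.pyGetD cs i ' ' ∈ "DEHCSTY".toList ∧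
         2 ≤ PySem.List.pyGetD (pvPrefixH cs 0) (i + 3) 0 -
             PySem.List.pyGetD (pvPrefixH cs 0) (i - 2) 0 then
        acc ++ [offset + i]
      else acc)
      = fun acc i => if pvQB cs i = true then acc ++ [offset + i] else acc := by
    funext acc i
    by_cases h : PySem.List.pyGetD cs i ' ' ∈ "DEHCSTY".toList ∧
        2 ≤ PySem.List.pyGetD (pvPrefixH cs 0) (i + 3) 0 -
            PySem.List.pyGetD (pvPrefixH cs 0) (i - 2) 0 <;>
      simp [pvQB, h]
  simp only [hstepA, hstepB, PySem.List.foldl_append_if,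
    PySem.List.enumerate_eq_map_pyRange cs ' ', List.filter_map, List.map_map,
    List.nil_append]
  rw [show PySem.List.len cs = (cs.length : Int) from rfl]
  rw [show ((fun p : Int × Char => pvQA cs p) ∘ fun j => (j, PySem.List.pyGetD cs j ' '))
        = fun j => pvQA cs (j, PySem.List.pyGetD cs j ' ') from rfl]
  rw [pvFilter_eq cs]
  rfl
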